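-- pv_equiv track=rewrite | github.com/AlexS-1/Bachelor-Code | build/extraction.py | order_commits_data
-- ===== SOURCE A (Python) =====
-- def order_commits_data(commit_data):
--     ordered_commits = {}
--     for commit_filename, _ in commit_data.items():
--         ordered_commits[commit_filename] = []
--     for commit_filename, commit_file_data in commit_data.items():
--         for commit in commit_file_data:
--             if ordered_commits[commit["filename"]] == []:
--                 ordered_commits[commit["filename"]].append(commit)
--             elif ordered_commits[commit["filename"]][-1]["commit"] != commit["commit"]:
--                 ordered_commits[commit["filename"]].append(commit)
--     return ordered_commits
-- ===== SOURCE B (Python) =====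
-- def order_commits_data(commit_data):
--     # Phase 1: gather every commit into its filename bucket (KeyError on unknown filename, like A).
--     buckets = {filename: [] for filename in commit_data}
--     for commit_file_data in commit_data.values():
--         for commit in commit_file_data:
--             buckets[commit["filename"]].append(commit)
--     # Phase 2: collapse each full bucket, keeping the first commit of each consecutive run.
--     return {filename: _collapse(bucket) for filename, bucket in buckets.items()}
--
--
-- def _collapse(bucket):
--     if not bucket:
--         return []
--     head = bucket[0]
--     i = 1
--     while i < len(bucket) and bucket[i]["commit"] == head["commit"]:
--         i += 1
--     return [head] + _collapse(bucket[i:])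
-- ===== Notes on version B (the rewrite author's own statement) =====
-- stated objective: alternative
-- what changed: A fuses gathering and dedup in one scan that inspects the bucket's last kept element at every step; B first gathers every commit into full per-filename buckets, then collapses each bucket in a second phase with a recursive run-skipper that keeps the first commit of each consecutive run.
import Mathlib
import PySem

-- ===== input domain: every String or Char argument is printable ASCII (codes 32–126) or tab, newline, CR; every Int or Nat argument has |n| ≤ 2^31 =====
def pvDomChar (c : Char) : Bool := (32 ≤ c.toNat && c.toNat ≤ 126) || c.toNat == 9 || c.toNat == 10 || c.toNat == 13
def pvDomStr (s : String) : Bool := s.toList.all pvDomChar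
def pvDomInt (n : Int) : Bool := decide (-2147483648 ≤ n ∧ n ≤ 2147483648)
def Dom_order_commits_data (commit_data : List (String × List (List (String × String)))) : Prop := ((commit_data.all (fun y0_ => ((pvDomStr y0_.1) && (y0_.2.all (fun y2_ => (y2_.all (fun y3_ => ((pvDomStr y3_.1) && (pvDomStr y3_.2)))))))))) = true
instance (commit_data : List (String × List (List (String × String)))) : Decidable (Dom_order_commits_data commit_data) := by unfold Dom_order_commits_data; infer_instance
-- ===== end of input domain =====

-- B replaces A's fused scan-and-dedup with a two-phase gather-into-full-buckets then
-- collapse-consecutive-runs (recursive run-skipper); same output, same cost (objective: alternative).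

-- field lookup in a commit record (a Python dict, lookup = first match)
def pvField (c : List (String × String)) (k : String) : Option String :=
  (PySem.Dict.mk c).get? k

-- ===== PORT A =====
-- one iteration of A's inner loop body (the dict is ordered_commits)
def pvAStep (d : PySem.Dict String (List (List (String × String))))
    (c : List (String × String)) : PySem.Dict String (List (List (String × String))) :=
  let k := (pvField c "filename").getD ""          -- commit["filename"]; none (KeyError) excluded by Pre_
  let b := d.getD k []                             -- ordered_commits[...]; missing key (KeyError) excluded by Pre_
  if b = [] then d.insert k (b ++ [c])
  else if pvField (b.getLast?.getD []) "commit" ≠ pvField c "commit" then d.insert k (b ++ [c])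
    -- b[-1] on the nonempty b of this branch is b.getLast?; ["commit"] KeyErrors excluded by Pre_
  else d

def order_commits_data (commit_data : List (String × List (List (String × String)))) : List (String × List (List (String × String))) :=
  let d0 := commit_data.foldl (fun d p => d.insert p.1 ([] : List (List (String × String)))) PySem.Dict.empty
  let d1 := commit_data.foldl (fun d p => p.2.foldl pvAStep d) d0
  d1.items

-- ===== PORT B =====
-- skip the leading run of commits whose "commit" field equals k (B's while loop + bucket[i:])
def pvSkipRun (k : Option String) : List (List (String × String)) → List (List (String × String))
  | [] => []
  | c :: t => if pvField c "commit" = k then pvSkipRun k t else c :: t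

theorem pvSkipRun_length_le (k : Option String) (l : List (List (String × String))) :
    (pvSkipRun k l).length ≤ l.length := by
  induction l with
  | nil => simp [pvSkipRun]
  | cons c t ih => simp only [pvSkipRun]; split <;> simp; omega

-- B's _collapse: keep the head, drop the rest of its run, recurse
def pvCollapse : List (List (String × String)) → List (List (String × String))
  | [] => []
  | h :: t => h :: pvCollapse (pvSkipRun (pvField h "commit") t)
termination_by l => l.length
decreasing_by exact Nat.lt_succ_of_le (pvSkipRun_length_le _ t)

-- one iteration of B's gather loop body
def pvBStep (d : PySem.Dict String (List (List (String × String))))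
    (c : List (String × String)) : PySem.Dict String (List (List (String × String))) :=
  let k := (pvField c "filename").getD ""
  d.insert k (d.getD k [] ++ [c])

def order_commits_data_alt (commit_data : List (String × List (List (String × String)))) : List (String × List (List (String × String))) :=
  let d0 := commit_data.foldl (fun d p => d.insert p.1 ([] : List (List (String × String)))) PySem.Dict.empty
  let d1 := commit_data.foldl (fun d p => p.2.foldl pvBStep d) d0
  d1.items.map (fun p => (p.1, pvCollapse p.2))

-- ===== PRECONDITION & SPEC =====
-- Pre_ excludes exactly the inputs on which A raises KeyError: a commit whose "filename" field
-- is missing or names no outer key, or a commit lacking the "commit" field while sharing its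
-- filename with another commit (only then is "commit" ever read); it also excludes duplicate
-- outer keys, which cannot represent a Python dict (the argument's type).
def Pre_order_commits_data (commit_data : List (String × List (List (String × String)))) : Prop :=
  (commit_data.map (·.1)).Nodup ∧
  ∀ p ∈ commit_data, ∀ c ∈ p.2,
    (∃ f ∈ commit_data.map (·.1), pvField c "filename" = some f) ∧
    (2 ≤ ((commit_data.flatMap (·.2)).filter
        (fun c' => pvField c' "filename" = pvField c "filename")).length →
      (pvField c "commit").isSome = true)
instance (commit_data : List (String × List (List (String × String)))) : Decidable (Pre_order_commits_data commit_data) := by unfold Pre_order_commits_data; infer_instance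

def pvWitness_order_commits_data : (List (String × List (List (String × String)))) :=
  [("a.py", [[("filename", "a.py"), ("commit", "c1")], [("filename", "a.py"), ("commit", "c1")]]),
   ("b.py", [[("filename", "b.py"), ("commit", "c2")]])]

def Spec_order_commits_data (commit_data : List (String × List (List (String × String)))) (out : List (String × List (List (String × String)))) : Prop := out = order_commits_data_alt commit_data
instance (commit_data : List (String × List (List (String × String)))) (out : List (String × List (List (String × String)))) : Decidable (Spec_order_commits_data commit_data out) := by unfold Spec_order_commits_data; infer_instance

-- ===== CLAIM (what is proved, stated in full; the proofs are below) =====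
def Claim_equal_order_commits_data : Prop := ∀ (commit_data : List (String × List (List (String × String)))), Dom_order_commits_data commit_data → Pre_order_commits_data commit_data → Spec_order_commits_data commit_data (order_commits_data commit_data)

-- ===== LEMMAS AND PROOFS =====

-- A's fused dedup, as a plain fold over one bucket
def pvStep (b : List (List (String × String))) (c : List (String × String)) : List (List (String × String)) :=
  if b = [] then b ++ [c]
  else if pvField (b.getLast?.getD []) "commit" ≠ pvField c "commit" then b ++ [c]
  else b

def pvFused (l : List (List (String × String))) : List (List (String × String)) :=
  l.foldl pvStep []

-- collapse with a pending run key
def pvDedupFrom (k : Option String) : List (List (String × String)) → List (List (String × String))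
  | [] => []
  | c :: t => if pvField c "commit" = k then pvDedupFrom k t else c :: pvDedupFrom (pvField c "commit") t

theorem pvDedupFrom_eq_collapse (l : List (List (String × String))) :
    ∀ k, pvDedupFrom k l = pvCollapse (pvSkipRun k l) := by
  induction l with
  | nil => intro k; simp [pvDedupFrom, pvSkipRun, pvCollapse]
  | cons c t ih =>
    intro k
    simp only [pvDedupFrom, pvSkipRun]
    by_cases h : pvField c "commit" = k
    · simp [h, ih]
    · simp [h, pvCollapse, ih]

theorem pvFused_aux (l : List (List (String × String))) :
    ∀ (acc : List (List (String × String))), acc ≠ [] →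
      l.foldl pvStep acc = acc ++ pvDedupFrom (pvField (acc.getLast?.getD []) "commit") l := by
  induction l with
  | nil => intro acc _; simp [pvDedupFrom]
  | cons c t ih =>
    intro acc hacc
    simp only [List.foldl_cons, pvDedupFrom]
    by_cases h : pvField (acc.getLast?.getD []) "commit" = pvField c "commit"
    · have hs : pvStep acc c = acc := by
        unfold pvStep
        rw [if_neg hacc, if_neg (by simpa using h)]
      rw [hs, if_pos h.symm, ih acc hacc, h]
    · have hs : pvStep acc c = acc ++ [c] := by
        unfold pvStep
        rw [if_neg hacc, if_pos h]
      rw [hs, if_neg (fun he => h he.symm), ih _ (by simp)]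
      simp [List.getLast?_append]

theorem pvCollapse_eq_fused (l : List (List (String × String))) : pvCollapse l = pvFused l := by
  cases l with
  | nil => simp [pvCollapse, pvFused]
  | cons h t =>
    have hs : pvStep [] h = [h] := by unfold pvStep; rw [if_pos rfl]; rfl
    simp only [pvFused, List.foldl_cons, hs]
    rw [pvFused_aux t [h] (by simp)]
    simp [pvCollapse, pvDedupFrom_eq_collapse]

theorem pvFused_eq_nil_iff (l : List (List (String × String))) : pvFused l = [] ↔ l = [] := by
  rw [← pvCollapse_eq_fused]
  cases l <;> simp [pvCollapse]

-- the value-wise image of a dict under pvFused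
def pvMapF (d : PySem.Dict String (List (List (String × String)))) :
    PySem.Dict String (List (List (String × String))) :=
  PySem.Dict.mk (d.items.map (fun p => (p.1, pvFused p.2)))

theorem pvMapF_keys (d : PySem.Dict String (List (List (String × String)))) :
    (pvMapF d).keys = d.keys := by
  simp [pvMapF, PySem.Dict.keys]

theorem pvMapF_get? (d : PySem.Dict String (List (List (String × String)))) (k : String) :
    (pvMapF d).get? k = (d.get? k).map pvFused := by
  obtain ⟨l⟩ := d
  induction l with
  | nil => rfl
  | cons p t ih =>
    obtain ⟨a, v⟩ := p
    simp only [pvMapF, List.map_cons, PySem.Dict.get?_mk_cons]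
    by_cases h : (a == k) = true
    · simp [h]
    · simp only [h]
      simpa [pvMapF] using ih

theorem pvMapF_contains (d : PySem.Dict String (List (List (String × String)))) (k : String) :
    (pvMapF d).contains k = d.contains k := by
  rw [PySem.Dict.contains_eq_isSome_get?, PySem.Dict.contains_eq_isSome_get?, pvMapF_get?]
  cases d.get? k <;> rfl

theorem pvMapF_insert (d : PySem.Dict String (List (List (String × String)))) (k : String)
    (v : List (List (String × String))) :
    pvMapF (d.insert k v) = (pvMapF d).insert k (pvFused v) := by
  apply PySem.Dict.ext
  by_cases h : d.contains k = true
  · have h' : (pvMapF d).contains k = true := by rw [pvMapF_contains]; exact h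
    rw [show (pvMapF (d.insert k v)).items = (d.insert k v).items.map (fun p => (p.1, pvFused p.2)) from rfl,
        PySem.Dict.items_insert_of_contains d v h,
        PySem.Dict.items_insert_of_contains (pvMapF d) (pvFused v) h',
        show (pvMapF d).items = d.items.map (fun p => (p.1, pvFused p.2)) from rfl,
        List.map_map, List.map_map]
    apply List.map_congr_left
    intro p _
    by_cases hp : (p.1 == k) = true
    · simp [Function.comp, hp]
    · simp [Function.comp, hp]
  · have hf : d.contains k = false := by simpa using h
    have hf' : (pvMapF d).contains k = false := by rw [pvMapF_contains]; exact hf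
    rw [show (pvMapF (d.insert k v)).items = (d.insert k v).items.map (fun p => (p.1, pvFused p.2)) from rfl,
        PySem.Dict.items_insert_of_not_contains d v hf,
        PySem.Dict.items_insert_of_not_contains (pvMapF d) (pvFused v) hf']
    simp [pvMapF]

-- inserting the value a key already holds changes nothing (unique keys)
theorem pv_insert_self_aux (k : String) (v : List (List (String × String))) :
    ∀ (l : List (String × List (List (String × String)))),
      (l.map (·.1)).Nodup → (PySem.Dict.mk l).get? k = some v →
      l.map (fun p => if (p.1 == k) = true then (k, v) else p) = l := by
  intro l
  induction l with
  | nil => intro _ _; rfl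
  | cons p t ih =>
    intro hnd h
    obtain ⟨a, b⟩ := p
    simp only [PySem.Dict.get?_mk_cons] at h
    simp only [List.map_cons] at hnd
    by_cases ha : (a == k) = true
    · have hak : a = k := by simpa using ha
      rw [if_pos ha] at h
      obtain rfl : b = v := by simpa using h
      subst hak
      simp only [List.map_cons, if_pos ha, List.cons.injEq, true_and]
      have hnotin : a ∉ t.map (·.1) := (List.nodup_cons.mp hnd).1
      have hq : ∀ q ∈ t, ¬ ((q.1 == a) = true) := fun q hq hqa =>
        hnotin (List.mem_map.mpr ⟨q, hq, by simpa using hqa⟩)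
      rw [List.map_congr_left (fun q hqm => by rw [if_neg (hq q hqm)])]
      simp
    · rw [if_neg ha] at h
      simp only [List.map_cons, if_neg ha, List.cons.injEq, true_and]
      exact ih (List.nodup_cons.mp hnd).2 h

theorem pv_insert_self (d : PySem.Dict String (List (List (String × String)))) (k : String)
    (v : List (List (String × String))) (hnd : d.keys.Nodup) (h : d.get? k = some v) :
    d.insert k v = d := by
  apply PySem.Dict.ext
  have hc : d.contains k = true := by
    rw [PySem.Dict.contains_eq_isSome_get?, h]; rfl
  rw [PySem.Dict.items_insert_of_contains d v hc]
  exact pv_insert_self_aux k v d.items hnd h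

-- one step: A's step on the collapsed image = image of B's step
theorem pv_step (dB : PySem.Dict String (List (List (String × String))))
    (c : List (String × String)) (hnd : dB.keys.Nodup)
    (hk : ((pvField c "filename").getD "") ∈ dB.keys) :
    pvAStep (pvMapF dB) c = pvMapF (pvBStep dB c) := by
  set k := (pvField c "filename").getD "" with hkdef
  obtain ⟨b, hb⟩ : ∃ b, dB.get? k = some b := by
    rcases hO : dB.get? k with _ | b
    · exact absurd ((PySem.Dict.get?_eq_none_iff_not_mem_keys dB k).mp hO) (not_not_intro hk)
    · exact ⟨b, rfl⟩
  have hgetB : dB.getD k [] = b := by rw [PySem.Dict.getD_eq_get?_getD, hb]; rfl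
  have hgetA : (pvMapF dB).getD k [] = pvFused b := by
    rw [PySem.Dict.getD_eq_get?_getD, pvMapF_get?, hb]; rfl
  simp only [pvAStep, pvBStep, ← hkdef, hgetA, hgetB, pvMapF_insert]
  by_cases hbe : pvFused b = []
  · have hb0 : b = [] := (pvFused_eq_nil_iff b).mp hbe
    subst hb0
    simp [pvFused, pvStep]
  · rw [if_neg hbe]
    -- fused (b ++ [c]) is A's step applied to fused b
    have hfa : pvFused (b ++ [c]) =
        if pvField ((pvFused b).getLast?.getD []) "commit" ≠ pvField c "commit"
        then pvFused b ++ [c] else pvFused b := by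
      have : pvFused (b ++ [c]) = pvStep (pvFused b) c := by
        simp [pvFused, List.foldl_append]
      rw [this]
      unfold pvStep
      rw [if_neg hbe]
    by_cases hcond : pvField ((pvFused b).getLast?.getD []) "commit" ≠ pvField c "commit"
    · rw [if_pos hcond, hfa, if_pos hcond]
    · rw [if_neg hcond, hfa, if_neg hcond]
      have : (pvMapF dB).get? k = some (pvFused b) := by rw [pvMapF_get?, hb]; rfl
      rw [pv_insert_self _ _ _ (by rw [pvMapF_keys]; exact hnd) this]

theorem pvBStep_keys (dB : PySem.Dict String (List (List (String × String))))
    (c : List (String × String)) (hk : ((pvField c "filename").getD "") ∈ dB.keys) :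
    (pvBStep dB c).keys = dB.keys := by
  unfold pvBStep
  exact PySem.Dict.keys_insert_of_contains dB _ ((PySem.Dict.contains_iff_mem_keys dB _).mpr hk)

-- fold the whole flattened commit stream
theorem pv_fold (L : List (List (String × String))) :
    ∀ (dB : PySem.Dict String (List (List (String × String)))), dB.keys.Nodup →
      (∀ c ∈ L, ((pvField c "filename").getD "") ∈ dB.keys) →
      L.foldl pvAStep (pvMapF dB) = pvMapF (L.foldl pvBStep dB) := by
  induction L with
  | nil => intro dB _ _; rfl
  | cons c t ih =>
    intro dB hnd hmem
    simp only [List.foldl_cons]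
    rw [pv_step dB c hnd (hmem c (by simp))]
    apply ih
    · have := pvBStep_keys dB c (hmem c (by simp))
      rw [this]; exact hnd
    · intro c' hc'
      rw [pvBStep_keys dB c (hmem c (by simp))]
      exact hmem c' (List.mem_cons_of_mem _ hc')

-- the init dict: all buckets empty, so it is its own image
theorem pv_d0_values (cd : List (String × List (List (String × String)))) :
    ∀ (d : PySem.Dict String (List (List (String × String)))),
      (∀ v ∈ d.values, v = []) →
      ∀ v ∈ (cd.foldl (fun d p => d.insert p.1 ([] : List (List (String × String)))) d).values, v = [] := by
  induction cd with
  | nil => intro d h; exact h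
  | cons p t ih =>
    intro d h
    simp only [List.foldl_cons]
    apply ih
    intro v hv
    rcases PySem.Dict.mem_values_insert d p.1 [] v hv with h1 | h2
    · exact h1
    · exact h v h2

theorem pvMapF_of_values_nil (d : PySem.Dict String (List (List (String × String))))
    (h : ∀ v ∈ d.values, v = []) : pvMapF d = d := by
  apply PySem.Dict.ext
  simp only [pvMapF]
  conv_rhs => rw [← List.map_id d.items]
  apply List.map_congr_left
  intro p hp
  obtain ⟨x, y⟩ := p
  have : y = [] := h y (List.mem_map.mpr ⟨(x, y), hp, rfl⟩)
  subst this
  simp [pvFused]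

-- ===== VERDICT (by name: the statement is the Claim_ definition above) =====
theorem order_commits_data_spec : Claim_equal_order_commits_data := by
  intro cd _ hpre
  obtain ⟨hnodup, hcomm⟩ := hpre
  unfold Spec_order_commits_data order_commits_data order_commits_data_alt
  dsimp only
  set d0 := cd.foldl (fun d p => d.insert p.1 ([] : List (List (String × String)))) PySem.Dict.empty with hd0
  have hd0keys : d0.keys = PySem.Set.update (PySem.Dict.empty : PySem.Dict String (List (List (String × String)))).keys (cd.map (·.1)) := by
    rw [hd0]
    exact PySem.Dict.keys_foldl_insert_key cd (·.1) (fun _ _ => []) PySem.Dict.empty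
  have hd0mem : ∀ x ∈ cd.map (·.1), x ∈ d0.keys := by
    intro x hx
    rw [hd0keys]
    have : PySem.Set.update (PySem.Dict.empty : PySem.Dict String (List (List (String × String)))).keys (cd.map (·.1)) = PySem.Set.ofList (cd.map (·.1)) := by
      rw [show (PySem.Dict.empty : PySem.Dict String (List (List (String × String)))).keys = ([] : List String) from rfl, PySem.Set.update_nil_left]
    rw [this, PySem.Set.mem_ofList]
    exact hx
  have hd0nd : d0.keys.Nodup := by
    rw [hd0]
    exact PySem.Dict.nodup_keys_foldl_insert_key cd (·.1) (fun _ _ => []) PySem.Dict.empty (by simp [PySem.Dict.empty, PySem.Dict.keys])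
  have hvals : ∀ v ∈ d0.values, v = [] := by
    rw [hd0]
    exact pv_d0_values cd PySem.Dict.empty (by simp [PySem.Dict.empty, PySem.Dict.values])
  have hflatA : cd.foldl (fun d p => p.2.foldl pvAStep d) d0 = (cd.flatMap (·.2)).foldl pvAStep d0 :=
    List.foldl_flatMap.symm
  have hflatB : cd.foldl (fun d p => p.2.foldl pvBStep d) d0 = (cd.flatMap (·.2)).foldl pvBStep d0 :=
    List.foldl_flatMap.symm
  have hmem : ∀ c ∈ cd.flatMap (·.2), ((pvField c "filename").getD "") ∈ d0.keys := by
    intro c hc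
    rw [List.mem_flatMap] at hc
    obtain ⟨p, hp, hcp⟩ := hc
    obtain ⟨⟨f, hf, hfc⟩, _⟩ := hcomm p hp c hcp
    rw [hfc]
    exact hd0mem f hf
  rw [hflatA, hflatB]
  conv_lhs => rw [← pvMapF_of_values_nil d0 hvals]
  rw [pv_fold (cd.flatMap (·.2)) d0 hd0nd hmem]
  simp [pvMapF, pvCollapse_eq_fused]
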